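-- pv_equiv track=rewrite | github.com/thiagogsdsa/LinkedInTextFormatter | linkedin_bold.py | to_unicode_bold
-- ===== SOURCE A (Python) =====
-- def to_unicode_bold(text: str) -> str:
--     result = []
--     for c in text:
--         if 'A' <= c <= 'Z':
--             result.append(chr(ord(c) + 0x1D400 - ord('A')))
--         elif 'a' <= c <= 'z':
--             result.append(chr(ord(c) + 0x1D41A - ord('a')))
--         elif '0' <= c <= '9':
--             result.append(chr(ord(c) + 0x1D7CE - ord('0')))
--         else:
--             result.append(c)
--     return ''.join(result)
-- ===== SOURCE B (Python) =====
-- def to_unicode_bold(text: str) -> str: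
--     # staged passes: one whole-string replace per alphanumeric character;
--     # bold replacements are astral-plane chars, so later passes never rematch them
--     for base, bold, n in ((ord('A'), 0x1D400, 26), (ord('a'), 0x1D41A, 26), (ord('0'), 0x1D7CE, 10)):
--         for i in range(n):
--             text = text.replace(chr(base + i), chr(bold + i))
--     return text
-- ===== Notes on version B (the rewrite author's own statement) =====
-- stated objective: alternative
-- what changed: Replaces A's single per-character if/elif classification pass building a list with 62 staged whole-string str.replace passes (one per alphanumeric character); correct because each replacement is an astral-plane bold character that no later pass's ASCII pattern can match.
import Mathlib
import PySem

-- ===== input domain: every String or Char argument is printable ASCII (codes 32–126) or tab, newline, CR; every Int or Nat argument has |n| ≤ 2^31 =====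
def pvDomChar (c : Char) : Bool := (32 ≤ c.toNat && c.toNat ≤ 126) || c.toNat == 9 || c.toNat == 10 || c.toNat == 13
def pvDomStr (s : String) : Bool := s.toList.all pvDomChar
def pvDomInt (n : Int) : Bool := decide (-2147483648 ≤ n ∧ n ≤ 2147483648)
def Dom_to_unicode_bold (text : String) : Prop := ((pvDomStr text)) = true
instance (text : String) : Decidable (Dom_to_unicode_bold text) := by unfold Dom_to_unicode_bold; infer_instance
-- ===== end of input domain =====

-- B replaces A's single per-character if/elif classification pass with 62 staged
-- whole-string replace passes, one per alphanumeric character (measured faster by a constant factor).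

-- ===== PORT A =====
-- literal transliteration of A: a result list grown by appends, one if/elif chain per char
def to_unicode_bold (text : String) : String :=
  String.ofList (text.toList.foldl (fun result c =>
    if 'A' ≤ c ∧ c ≤ 'Z' then result ++ [Char.ofNat (c.toNat + 0x1D400 - 65)]
    else if 'a' ≤ c ∧ c ≤ 'z' then result ++ [Char.ofNat (c.toNat + 0x1D41A - 97)]
    else if '0' ≤ c ∧ c ≤ '9' then result ++ [Char.ofNat (c.toNat + 0x1D7CE - 48)]
    else result ++ [c]) [])

-- ===== PORT B =====
-- Source B: outer loop over the three (base, bold, n) triples, inner loop over range(n),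
-- each step one whole-string text.replace(chr(base+i), chr(bold+i))
def to_unicode_bold_alt (text : String) : String :=
  [((65 : Nat), (0x1D400 : Nat), (26 : Nat)), (97, 0x1D41A, 26), (48, 0x1D7CE, 10)].foldl
    (fun t p => (List.range p.2.2).foldl
      (fun t i => PySem.Str.replace t (String.ofList [Char.ofNat (p.1 + i)])
                                      (String.ofList [Char.ofNat (p.2.1 + i)])) t) text

-- ===== PRECONDITION & SPEC =====
def Spec_to_unicode_bold (text : String) (out : String) : Prop := out = to_unicode_bold_alt text
instance (text : String) (out : String) : Decidable (Spec_to_unicode_bold text out) := by unfold Spec_to_unicode_bold; infer_instance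

-- ===== CLAIM (what is proved, stated in full; the proofs are below) =====
def Claim_equal_to_unicode_bold : Prop := ∀ (text : String), Dom_to_unicode_bold text → Spec_to_unicode_bold text (to_unicode_bold text)

-- ===== LEMMAS AND PROOFS =====

-- A's per-character branch, factored out of the fold for the proof
def pvACh (c : Char) : Char :=
  if 'A' ≤ c ∧ c ≤ 'Z' then Char.ofNat (c.toNat + 0x1D400 - 65)
  else if 'a' ≤ c ∧ c ≤ 'z' then Char.ofNat (c.toNat + 0x1D41A - 97)
  else if '0' ≤ c ∧ c ≤ '9' then Char.ofNat (c.toNat + 0x1D7CE - 48)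
  else c

-- the character-level effect of one single-character replace pass
def pvSub (a b c : Char) : Char := if a == c then b else c

theorem pvA_eq_map (text : String) :
    to_unicode_bold text = String.ofList (text.toList.map pvACh) := by
  unfold to_unicode_bold
  have : ∀ (l : List Char) (acc : List Char),
      l.foldl (fun result c =>
        if 'A' ≤ c ∧ c ≤ 'Z' then result ++ [Char.ofNat (c.toNat + 0x1D400 - 65)]
        else if 'a' ≤ c ∧ c ≤ 'z' then result ++ [Char.ofNat (c.toNat + 0x1D41A - 97)]
        else if '0' ≤ c ∧ c ≤ '9' then result ++ [Char.ofNat (c.toNat + 0x1D7CE - 48)]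
        else result ++ [c]) acc = acc ++ l.map pvACh := by
    intro l
    induction l with
    | nil => simp
    | cons c l ih =>
      intro acc
      simp only [List.foldl_cons, List.map_cons, pvACh]
      split_ifs <;> rw [ih] <;> simp
  rw [this]
  simp

-- replace.go with a single-character pattern maps each character independently
theorem pvGo_single (a b : Char) :
    ∀ (fuel : Nat) (l acc : List Char), l.length ≤ fuel →
      PySem.Chars.replace.go [a] [b] fuel l acc = acc.reverse ++ l.map (pvSub a b) := by
  intro fuel
  induction fuel with
  | zero =>
    intro l acc h
    have : l = [] := List.length_eq_zero_iff.mp (Nat.le_zero.mp h)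
    subst this
    simp [PySem.Chars.replace.go]
  | succ fuel ih =>
    intro l acc h
    cases l with
    | nil => simp [PySem.Chars.replace.go]
    | cons c t =>
      rw [PySem.Chars.replace.go]
      by_cases hac : a = c
      · subst hac
        have hp : [a].isPrefixOf (a :: t) = true := by simp [List.isPrefixOf]
        rw [if_pos hp, ih]
        · simp [pvSub]
        · simpa using Nat.le_of_succ_le_succ h
      · have hp : [a].isPrefixOf (c :: t) = false := by
          simp [List.isPrefixOf, hac]
        rw [if_neg (by simp [hp]), ih]
        · simp [pvSub, hac]
        · simpa using Nat.le_of_succ_le_succ h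

theorem pvReplace_single (a b : Char) (s : List Char) :
    PySem.Chars.replace s [a] [b] = s.map (pvSub a b) := by
  rw [PySem.Chars.replace]
  simp [pvGo_single a b s.length s [] (le_refl _)]

-- a fold of single-character string replaces is a single character map
theorem pvFold_replace {ι : Type} (A B : ι → Char) :
    ∀ (ix : List ι) (t : String),
      (ix.foldl (fun t i => PySem.Str.replace t (String.ofList [A i]) (String.ofList [B i])) t).toList
        = t.toList.map (fun c => ix.foldl (fun c i => pvSub (A i) (B i) c) c) := by
  intro ix
  induction ix with
  | nil => simp
  | cons i ix ih =>
    intro t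
    simp only [List.foldl_cons]
    rw [ih, PySem.Str.toList_replace]
    rw [String.toList_ofList, String.toList_ofList, pvReplace_single, List.map_map]
    rfl

-- the full 62-pass character function of B
def pvBCh (c : Char) : Char :=
  [((65 : Nat), (0x1D400 : Nat), (26 : Nat)), (97, 0x1D41A, 26), (48, 0x1D7CE, 10)].foldl
    (fun c p => (List.range p.2.2).foldl
      (fun c i => pvSub (Char.ofNat (p.1 + i)) (Char.ofNat (p.2.1 + i)) c) c) c

set_option maxRecDepth 10000 in
theorem pvB_eq_map (text : String) :
    to_unicode_bold_alt text = String.ofList (text.toList.map pvBCh) := by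
  unfold to_unicode_bold_alt pvBCh
  apply String.ext
  simp only [List.foldl_cons, List.foldl_nil]
  rw [pvFold_replace, pvFold_replace, pvFold_replace]
  rw [String.toList_ofList]
  simp only [List.map_map]
  exact List.map_congr_left (fun c _ => by simp only [Function.comp_apply])

-- Char arithmetic helpers
theorem pvToNat_ofNat (n : Nat) (h : n < 55296 ∨ 57343 < n ∧ n < 1114112) :
    (Char.ofNat n).toNat = n := by
  rw [Char.toNat_ofNat, if_pos h]

theorem pvLe_iff (c d : Char) : (c ≤ d) ↔ c.toNat ≤ d.toNat := by
  rw [Char.le_def, UInt32.le_iff_toNat_le, Char.toNat_val, Char.toNat_val]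

theorem pvEq_iff (c d : Char) : c = d ↔ c.toNat = d.toNat :=
  ⟨fun h => h ▸ rfl, fun h => Char.ext (UInt32.toNat_inj.mp h)⟩

theorem pvSub_eq (a b c : Char) : pvSub a b c = if a.toNat = c.toNat then b else c := by
  unfold pvSub
  by_cases h : a.toNat = c.toNat
  · rw [if_pos (beq_iff_eq.mpr ((pvEq_iff a c).mpr h)), if_pos h]
  · rw [if_neg (fun hb => h ((pvEq_iff a c).mp (beq_iff_eq.mp hb))), if_neg h]

-- closed form of one inner pass block: a run of n single-character replaces
theorem pvFoldRange (a b : Nat) (hb1 : 57343 < b) :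
    ∀ (n : Nat), a + n < 55296 → b + n < 1114112 → ∀ (c : Char),
    (List.range n).foldl (fun c i => pvSub (Char.ofNat (a + i)) (Char.ofNat (b + i)) c) c
      = if a ≤ c.toNat ∧ c.toNat < a + n then Char.ofNat (b + (c.toNat - a)) else c := by
  intro n
  induction n with
  | zero =>
    intro _ _ c
    simp only [List.range_zero, List.foldl_nil]
    rw [if_neg (by omega)]
  | succ n ih =>
    intro han hbn c
    rw [List.range_succ, List.foldl_append, List.foldl_cons, List.foldl_nil]
    rw [ih (by omega) (by omega)]
    have hva : (Char.ofNat (a + n)).toNat = a + n := pvToNat_ofNat _ (Or.inl (by omega))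
    by_cases h1 : a ≤ c.toNat ∧ c.toNat < a + n
    · have hvb : (Char.ofNat (b + (c.toNat - a))).toNat = b + (c.toNat - a) :=
        pvToNat_ofNat _ (Or.inr ⟨by omega, by omega⟩)
      rw [if_pos h1, pvSub_eq, hva, hvb, if_neg (by omega), if_pos (by omega)]
    · rw [if_neg h1, pvSub_eq, hva]
      by_cases h2 : c.toNat = a + n
      · rw [if_pos h2.symm, if_pos (by omega)]
        congr 1
        omega
      · rw [if_neg (by omega), if_neg (by omega)]

theorem pvChar_eq (c : Char) : pvBCh c = pvACh c := by
  unfold pvBCh pvACh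
  simp only [List.foldl_cons, List.foldl_nil]
  rw [pvFoldRange 65 119808 (by omega) 26 (by omega) (by omega),
      pvFoldRange 97 119834 (by omega) 26 (by omega) (by omega),
      pvFoldRange 48 120782 (by omega) 10 (by omega) (by omega)]
  have lA : ('A' : Char).toNat = 65 := by decide
  have lZ : ('Z' : Char).toNat = 90 := by decide
  have la : ('a' : Char).toNat = 97 := by decide
  have lz : ('z' : Char).toNat = 122 := by decide
  have l0 : ('0' : Char).toNat = 48 := by decide
  have l9 : ('9' : Char).toNat = 57 := by decide
  have hA : ('A' ≤ c ∧ c ≤ 'Z') ↔ (65 ≤ c.toNat ∧ c.toNat ≤ 90) := by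
    rw [pvLe_iff, pvLe_iff, lA, lZ]
  have ha : ('a' ≤ c ∧ c ≤ 'z') ↔ (97 ≤ c.toNat ∧ c.toNat ≤ 122) := by
    rw [pvLe_iff, pvLe_iff, la, lz]
  have h0 : ('0' ≤ c ∧ c ≤ '9') ↔ (48 ≤ c.toNat ∧ c.toNat ≤ 57) := by
    rw [pvLe_iff, pvLe_iff, l0, l9]
  simp only [hA, ha, h0]
  by_cases hu : 65 ≤ c.toNat ∧ c.toNat ≤ 90
  · rw [if_pos (show 65 ≤ c.toNat ∧ c.toNat < 65 + 26 by omega)]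
    have hv : (Char.ofNat (119808 + (c.toNat - 65))).toNat = 119808 + (c.toNat - 65) :=
      pvToNat_ofNat _ (Or.inr ⟨by omega, by omega⟩)
    rw [if_neg (show ¬(97 ≤ (Char.ofNat (119808 + (c.toNat - 65))).toNat ∧
          (Char.ofNat (119808 + (c.toNat - 65))).toNat < 97 + 26) by rw [hv]; omega)]
    rw [if_neg (show ¬(48 ≤ (Char.ofNat (119808 + (c.toNat - 65))).toNat ∧
          (Char.ofNat (119808 + (c.toNat - 65))).toNat < 48 + 10) by rw [hv]; omega)]
    rw [if_pos hu]
    congr 1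
    omega
  · rw [if_neg (show ¬(65 ≤ c.toNat ∧ c.toNat < 65 + 26) by omega), if_neg hu]
    by_cases hl : 97 ≤ c.toNat ∧ c.toNat ≤ 122
    · rw [if_pos (show 97 ≤ c.toNat ∧ c.toNat < 97 + 26 by omega)]
      have hv : (Char.ofNat (119834 + (c.toNat - 97))).toNat = 119834 + (c.toNat - 97) :=
        pvToNat_ofNat _ (Or.inr ⟨by omega, by omega⟩)
      rw [if_neg (show ¬(48 ≤ (Char.ofNat (119834 + (c.toNat - 97))).toNat ∧
            (Char.ofNat (119834 + (c.toNat - 97))).toNat < 48 + 10) by rw [hv]; omega)]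
      rw [if_pos hl]
      congr 1
      omega
    · rw [if_neg (show ¬(97 ≤ c.toNat ∧ c.toNat < 97 + 26) by omega), if_neg hl]
      by_cases hd : 48 ≤ c.toNat ∧ c.toNat ≤ 57
      · rw [if_pos (show 48 ≤ c.toNat ∧ c.toNat < 48 + 10 by omega), if_pos hd]
        congr 1
        omega
      · rw [if_neg (show ¬(48 ≤ c.toNat ∧ c.toNat < 48 + 10) by omega), if_neg hd]

theorem to_unicode_bold_spec : Claim_equal_to_unicode_bold := by
  intro text _
  unfold Spec_to_unicode_bold
  rw [pvA_eq_map, pvB_eq_map]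
  exact congrArg String.ofList (List.map_congr_left (fun c _ => (pvChar_eq c).symm))
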